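-- pv_equiv track=rewrite | github.com/HarshaVippala/ResumeForge | backend/services/resume/enhancers/professional_headline_generator.py | _select_best_template
-- ===== SOURCE A (Python) =====
-- from typing import Dict, List, Any, Optional, Tuple
--
-- def _select_best_template(templates: List[str], template_vars: Dict[str, Any]) -> str:
--     """Select the best template based on available variables"""
--
--     # Score templates based on variable availability and specificity
--     template_scores = []
--
--     for template in templates:
--         score = 0
--
--         # Check which variables are used in template
--         if '{primary_tech}' in template and template_vars['primary_tech'] != 'Software Development':
--             score += 3
--         if '{secondary_tech}' in template and template_vars['secondary_tech'] != 'Cloud Technologies':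
--             score += 2
--         if '{primary_domain}' in template and template_vars['primary_domain'] != 'Scalable Applications':
--             score += 2
--         if '{experience_years}' in template:
--             score += 1
--         if '{experience_level}' in template:
--             score += 1
--
--         template_scores.append((template, score))
--
--     # Sort by score and return best template
--     template_scores.sort(key=lambda x: x[1], reverse=True)
--     return template_scores[0][0]
-- ===== SOURCE B (Python) =====
-- def _select_best_template(templates, template_vars):
--     """Select the best template based on available variables (single pass, first max wins)."""
--     best = None
--     best_score = -1
--     for template in templates:
--         score = 0
--         if '{primary_tech}' in template and template_vars['primary_tech'] != 'Software Development':
--             score += 3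
--         if '{secondary_tech}' in template and template_vars['secondary_tech'] != 'Cloud Technologies':
--             score += 2
--         if '{primary_domain}' in template and template_vars['primary_domain'] != 'Scalable Applications':
--             score += 2
--         if '{experience_years}' in template:
--             score += 1
--         if '{experience_level}' in template:
--             score += 1
--         if score > best_score:
--             best = template
--             best_score = score
--     return best
-- ===== Notes on version B (the rewrite author's own statement) =====
-- stated objective: alternative
-- what changed: Replaces build-(template,score)-list then stable reverse sort then index [0] with a single running-best pass updating only on a strictly greater score (first template wins ties); no intermediate list or sort.
import Mathlib
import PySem

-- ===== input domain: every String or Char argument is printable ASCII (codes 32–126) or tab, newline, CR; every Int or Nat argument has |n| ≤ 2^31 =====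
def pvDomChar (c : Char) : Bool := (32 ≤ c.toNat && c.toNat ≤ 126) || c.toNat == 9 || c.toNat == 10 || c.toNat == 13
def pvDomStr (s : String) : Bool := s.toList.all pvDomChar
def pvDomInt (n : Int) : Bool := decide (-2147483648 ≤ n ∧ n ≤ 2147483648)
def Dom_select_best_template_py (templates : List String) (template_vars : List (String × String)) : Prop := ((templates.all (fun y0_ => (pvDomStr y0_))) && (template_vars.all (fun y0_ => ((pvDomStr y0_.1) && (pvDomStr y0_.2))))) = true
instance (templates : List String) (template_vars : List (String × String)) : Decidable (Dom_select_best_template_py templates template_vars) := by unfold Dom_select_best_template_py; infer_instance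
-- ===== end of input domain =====

-- B replaces A's build-list / stable reverse-sort / take-[0] with a single running-best pass
-- (strictly-greater update, so the first template wins ties); alternative decomposition, same result.


-- shared scoring of one template (the five if-checks both Pythons perform verbatim);
-- the dict lookups use getD "": Pre_ excludes the inputs where Python's lookup would raise KeyError
def pvScore (template_vars : List (String × String)) (template : String) : Int :=
  (if PySem.Str.isIn "{primary_tech}" template = true ∧
      (PySem.Dict.get? (PySem.Dict.mk template_vars) "primary_tech").getD "" ≠ "Software Development" then 3 else 0) +
  (if PySem.Str.isIn "{secondary_tech}" template = true ∧
      (PySem.Dict.get? (PySem.Dict.mk template_vars) "secondary_tech").getD "" ≠ "Cloud Technologies" then 2 else 0) +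
  (if PySem.Str.isIn "{primary_domain}" template = true ∧
      (PySem.Dict.get? (PySem.Dict.mk template_vars) "primary_domain").getD "" ≠ "Scalable Applications" then 2 else 0) +
  (if PySem.Str.isIn "{experience_years}" template = true then 1 else 0) +
  (if PySem.Str.isIn "{experience_level}" template = true then 1 else 0)

-- ===== PORT A =====
def select_best_template_py (templates : List String) (template_vars : List (String × String)) : String :=
  let template_scores := templates.map (fun template => (template, pvScore template_vars template))
  let sorted := PySem.List.sorted template_scores (fun x => x.2) true
  match PySem.List.pyGet? sorted 0 with          -- template_scores[0][0]; none = IndexError, excluded by Pre_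
  | some p => p.1
  | none => ""

-- ===== PORT B =====
def select_best_template_py_alt (templates : List String) (template_vars : List (String × String)) : String :=
  let res := templates.foldl
    (fun (st : Option String × Int) template =>
      let score := pvScore template_vars template
      if st.2 < score then (some template, score) else st)
    (none, -1)
  res.1.getD ""                                   -- best is None only on [], excluded by Pre_

-- ===== PRECONDITION & SPEC =====
-- Pre_ excludes exactly the inputs where A raises: the empty template list (IndexError) and
-- templates mentioning a placeholder whose key is missing from template_vars (KeyError).
def Pre_select_best_template_py (templates : List String) (template_vars : List (String × String)) : Prop :=
  templates ≠ [] ∧ ∀ t ∈ templates,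
    (PySem.Str.isIn "{primary_tech}" t = true → (PySem.Dict.get? (PySem.Dict.mk template_vars) "primary_tech").isSome = true) ∧
    (PySem.Str.isIn "{secondary_tech}" t = true → (PySem.Dict.get? (PySem.Dict.mk template_vars) "secondary_tech").isSome = true) ∧
    (PySem.Str.isIn "{primary_domain}" t = true → (PySem.Dict.get? (PySem.Dict.mk template_vars) "primary_domain").isSome = true)
instance (templates : List String) (template_vars : List (String × String)) : Decidable (Pre_select_best_template_py templates template_vars) := by unfold Pre_select_best_template_py; infer_instance

def pvWitness_select_best_template_py : List String × (List (String × String)) :=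
  (["{primary_tech} engineer", "plain headline"], [("primary_tech", "Python")])

def Spec_select_best_template_py (templates : List String) (template_vars : List (String × String)) (out : String) : Prop := out = select_best_template_py_alt templates template_vars
instance (templates : List String) (template_vars : List (String × String)) (out : String) : Decidable (Spec_select_best_template_py templates template_vars out) := by unfold Spec_select_best_template_py; infer_instance

-- ===== CLAIM (what is proved, stated in full; the proofs are below) =====
def Claim_equal_select_best_template_py : Prop := ∀ (templates : List String) (template_vars : List (String × String)), Dom_select_best_template_py templates template_vars → Pre_select_best_template_py templates template_vars → Spec_select_best_template_py templates template_vars (select_best_template_py templates template_vars)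

-- ===== LEMMAS AND PROOFS =====

-- head of one insertion step of the stable reverse sort: the head changes iff the new key is strictly greater
theorem pv_insertBy_head {α κ : Type} [LinearOrder κ] (key : α → κ) (x : α) (acc : List α) :
    (PySem.List.insertBy (fun a b => decide (key b < key a)) x acc).head? =
      some (match acc.head? with
            | none => x
            | some h => if key h < key x then x else h) := by
  cases acc with
  | nil => rfl
  | cons y ys =>
    simp only [PySem.List.insertBy]
    by_cases h : key y < key x
    · simp [h]
    · simp [h]

-- head of the whole insertion fold = running first-strict-max
theorem pv_foldl_ins_head {α κ : Type} [LinearOrder κ] (key : α → κ) :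
    ∀ (xs acc : List α) (h : α), acc.head? = some h →
      (xs.foldl (fun acc x => PySem.List.insertBy (fun a b => decide (key b < key a)) x acc) acc).head? =
        some (xs.foldl (fun b y => if key b < key y then y else b) h) := by
  intro xs
  induction xs with
  | nil => intro acc h hh; simpa using hh
  | cons x xs ih =>
    intro acc h hh
    simp only [List.foldl_cons]
    have := pv_insertBy_head key x acc
    rw [hh] at this
    exact ih _ _ this

-- the pair fold over the mapped list mirrors the fold over the templates themselves
theorem pv_fold_pair_map (template_vars : List (String × String)) :
    ∀ (xs : List String) (b : String),
      (xs.map (fun t => (t, pvScore template_vars t))).foldl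
          (fun p q => if (p : String × Int).2 < q.2 then q else p) (b, pvScore template_vars b) =
        (xs.foldl (fun b y => if pvScore template_vars b < pvScore template_vars y then y else b) b,
         pvScore template_vars (xs.foldl (fun b y => if pvScore template_vars b < pvScore template_vars y then y else b) b)) := by
  intro xs
  induction xs with
  | nil => intro b; rfl
  | cons x xs ih =>
    intro b
    simp only [List.map_cons, List.foldl_cons]
    by_cases h : pvScore template_vars b < pvScore template_vars x
    · simp only [h, if_pos]; exact ih x
    · simp only [h, if_false]; exact ih b

-- every score is nonnegative (so B's first iteration always replaces the -1 seed)
theorem pv_score_nonneg (template_vars : List (String × String)) (t : String) :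
    0 ≤ pvScore template_vars t := by
  unfold pvScore
  split_ifs <;> norm_num

-- B's fold, once seeded with a real element, tracks the running first-strict-max
theorem pv_B_fold (template_vars : List (String × String)) :
    ∀ (xs : List String) (b : String),
      (xs.foldl
        (fun (st : Option String × Int) template =>
          let score := pvScore template_vars template
          if st.2 < score then (some template, score) else st)
        (some b, pvScore template_vars b)).1 =
      some (xs.foldl (fun b y => if pvScore template_vars b < pvScore template_vars y then y else b) b) := by
  intro xs
  induction xs with
  | nil => intro b; rfl
  | cons x xs ih =>
    intro b
    simp only [List.foldl_cons]
    by_cases h : pvScore template_vars b < pvScore template_vars x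
    · simp only [h, if_pos]; exact ih x
    · simp only [h, if_false]; exact ih b

-- ===== VERDICT (by name: the statement is the Claim_ definition above) =====
theorem select_best_template_py_spec : Claim_equal_select_best_template_py := by
  intro templates template_vars _ hpre
  obtain ⟨hne, -⟩ := hpre
  unfold Spec_select_best_template_py select_best_template_py select_best_template_py_alt
  cases templates with
  | nil => exact absurd rfl hne
  | cons t ts =>
    simp only []
    -- A side: head of the stable reverse sort
    have hsortfold := PySem.List.sorted_rev_eq_foldl_insertBy
      ((t :: ts).map (fun template => (template, pvScore template_vars template)))
      (fun x : String × Int => x.2)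
    have hhead :
        (PySem.List.sorted ((t :: ts).map (fun template => (template, pvScore template_vars template)))
            (fun x : String × Int => x.2) true).head? =
          some ((ts.map (fun u => (u, pvScore template_vars u))).foldl
            (fun p q => if (p : String × Int).2 < q.2 then q else p) (t, pvScore template_vars t)) := by
      rw [hsortfold]
      simp only [List.map_cons, List.foldl_cons]
      exact pv_foldl_ins_head (fun x : String × Int => x.2)
        (ts.map (fun u => (u, pvScore template_vars u)))
        (PySem.List.insertBy (fun a b => decide ((b : String × Int).2 < a.2))
          (t, pvScore template_vars t) []) (t, pvScore template_vars t) rfl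
    rw [pv_fold_pair_map] at hhead
    -- A's pyGet? 0 is the head
    rw [PySem.List.pyGet?_zero]
    cases hs : PySem.List.sorted ((t :: ts).map (fun template => (template, pvScore template_vars template)))
        (fun x : String × Int => x.2) true with
    | nil => simp [PySem.List.sorted_eq_nil_iff] at hs
    | cons m tl =>
      rw [hs] at hhead
      simp only [List.head?_cons, Option.some.injEq] at hhead
      -- B side
      have hB :
          ((t :: ts).foldl
            (fun (st : Option String × Int) template =>
              let score := pvScore template_vars template
              if st.2 < score then (some template, score) else st)
            (none, -1)).1 =
          some (ts.foldl (fun b y => if pvScore template_vars b < pvScore template_vars y then y else b) t) := by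
        simp only [List.foldl_cons]
        have h0 : (-1 : Int) < pvScore template_vars t :=
          lt_of_lt_of_le (by norm_num) (pv_score_nonneg template_vars t)
        simp only [h0, if_pos]
        exact pv_B_fold template_vars ts t
      rw [hB, Option.getD_some, hhead]
      rfl
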